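-- pv_equiv track=rewrite | github.com/maciej88/python1-2022 | src/algo/z10/solution.py | check_signs
-- ===== SOURCE A (Python) =====
-- def check_signs(word: str) -> int:
--     max_l = 0
--     current_l = 0
--     sign = None
--     start_list = [*word]
--     for i, x in enumerate(start_list[2::]):
--         if x == '<':
--             current_l = current_l + 1 if sign == '<' else (sign := '<') and 1
--         elif x == '>':
--             current_l = current_l +1 if sign == '>' else (sign := '>') and 1
--             # w celu objaśnienia góry, u doły stos if
--             # if sign == '>':
--             #     current_l += 1
--             # else:
--             #     sign = '>'
--             #     current_l = 1
--         if current_l > max_l: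
--             max_l = current_l
--
--     return max_l
-- ===== SOURCE B (Python) =====
-- def check_signs(word: str) -> int:
--     filtered = [c for c in word[2:] if c == '<' or c == '>']
--     groups = []
--     for c in filtered:
--         if groups and groups[-1][0] == c:
--             groups[-1][1] += 1
--         else:
--             groups.append([c, 1])
--     return max((n for _, n in groups), default=0)
-- ===== Notes on version B (the rewrite author's own statement) =====
-- stated objective: idiomatic
-- what changed: Replaces A's fused index-2 state machine with a filter stage (keep only '<'/'>') followed by a run-length grouping pass whose maximum group size is returned.
import Mathlib
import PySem

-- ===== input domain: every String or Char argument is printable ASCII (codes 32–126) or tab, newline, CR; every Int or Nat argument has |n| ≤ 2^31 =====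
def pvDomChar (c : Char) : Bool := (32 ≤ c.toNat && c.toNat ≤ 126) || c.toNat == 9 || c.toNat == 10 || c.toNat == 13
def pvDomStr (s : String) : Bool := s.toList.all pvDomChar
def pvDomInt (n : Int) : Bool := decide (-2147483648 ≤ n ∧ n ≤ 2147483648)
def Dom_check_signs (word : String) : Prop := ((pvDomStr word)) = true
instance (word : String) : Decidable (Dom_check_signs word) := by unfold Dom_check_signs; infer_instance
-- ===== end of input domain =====

-- B filters the non-sign characters out of word[2:] and returns the largest run-length
-- produced by a grouping pass — a plainer two-stage decomposition of A's fused state machine.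

-- ===== PORT A =====
-- loop body of A's for-loop: state (max_l, current_l, sign)
def stepA (st : Int × Int × Option Char) (x : Char) : Int × Int × Option Char :=
  let (max_l, current_l, sign) := st
  let (current_l, sign) :=
    if x = '<' then
      if sign = some '<' then (current_l + 1, sign) else (1, some '<')
    else if x = '>' then
      if sign = some '>' then (current_l + 1, sign) else (1, some '>')
    else (current_l, sign)
  let max_l := if current_l > max_l then current_l else max_l
  (max_l, current_l, sign)

def check_signs (word : String) : Int :=
  let start_list := word.toList
  ((PySem.List.slice start_list (some 2) none).foldl stepA (0, 0, none)).1

-- ===== PORT B =====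
-- loop body of B's grouping loop; Python appends at the end of `groups`,
-- here the current (last) group is kept at the HEAD of the list (order of the
-- group list does not matter for the final max).
def stepB (gs : List (Char × Int)) (c : Char) : List (Char × Int) :=
  match gs with
  | (p, n) :: rest => if p = c then (p, n + 1) :: rest else (c, 1) :: (p, n) :: rest
  | [] => [(c, 1)]

def check_signs_alt (word : String) : Int :=
  let filtered := (PySem.List.slice word.toList (some 2) none).filter
    (fun c => c = '<' || c = '>')
  let groups := filtered.foldl stepB []
  (groups.map Prod.snd).foldl max 0

-- ===== PRECONDITION & SPEC =====
def Spec_check_signs (word : String) (out : Int) : Prop := out = check_signs_alt word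
instance (word : String) (out : Int) : Decidable (Spec_check_signs word out) := by unfold Spec_check_signs; infer_instance

-- ===== CLAIM (what is proved, stated in full; the proofs are below) =====
def Claim_equal_check_signs : Prop := ∀ (word : String), Dom_check_signs word → Spec_check_signs word (check_signs word)

-- ===== LEMMAS AND PROOFS =====

lemma foldl_max_init (L : List Int) : ∀ (a b : Int),
    List.foldl max (max a b) L = max a (List.foldl max b L) := by
  induction L with
  | nil => intro a b; simp
  | cons x L ih =>
    intro a b
    simp only [List.foldl]
    rw [max_assoc, ih]

-- the relation between A's running state and B's group list
def RelAB (st : Int × Int × Option Char) (gs : List (Char × Int)) : Prop :=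
  st.1 = (gs.map Prod.snd).foldl max 0 ∧
  match gs with
  | [] => st.2.1 = 0 ∧ st.2.2 = none
  | (p, n) :: _ => st.2.1 = n ∧ st.2.2 = some p

lemma stepA_not_sign {st : Int × Int × Option Char} (x : Char)
    (hle : st.2.1 ≤ st.1) (h1 : x ≠ '<') (h2 : x ≠ '>') : stepA st x = st := by
  obtain ⟨m, c, s⟩ := st
  simp only at hle
  simp [stepA, h1, h2, not_lt.mpr hle]

lemma foldl_stepA_filter (xs : List Char) : ∀ (st : Int × Int × Option Char),
    st.2.1 ≤ st.1 →
    xs.foldl stepA st = (xs.filter (fun c => c = '<' || c = '>')).foldl stepA st := by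
  induction xs with
  | nil => intro st _; rfl
  | cons x xs ih =>
    intro st hle
    by_cases h1 : x = '<'
    · have hle' : (stepA st x).2.1 ≤ (stepA st x).1 := by
        obtain ⟨m, c, s⟩ := st
        simp only [stepA]
        split_ifs <;> simp <;> omega
      simp only [List.foldl, List.filter, h1]
      simpa using ih (stepA st '<') (h1 ▸ hle')
    · by_cases h2 : x = '>'
      · have hle' : (stepA st x).2.1 ≤ (stepA st x).1 := by
          obtain ⟨m, c, s⟩ := st
          simp only [stepA]
          split_ifs <;> simp <;> omega
        simp only [List.foldl, List.filter, h2]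
        simpa using ih (stepA st '>') (h2 ▸ hle')
      · simp only [List.foldl, List.filter, h1, h2]
        rw [stepA_not_sign x hle h1 h2]
        simpa [h1, h2] using ih st hle

lemma foldl_max_zero_cons (n : Int) (L : List Int) :
    List.foldl max 0 (n :: L) = max n (List.foldl max 0 L) := by
  simp only [List.foldl]
  rw [max_comm 0 n, foldl_max_init]

lemma Rel_step {st : Int × Int × Option Char} {gs : List (Char × Int)} (x : Char)
    (hx : x = '<' ∨ x = '>') (h : RelAB st gs) : RelAB (stepA st x) (stepB gs x) := by
  obtain ⟨m, c, s⟩ := st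
  obtain ⟨h1, h2⟩ := h
  simp only at h1
  -- stepA on a sign char: the current run extends iff the remembered sign matches x
  have hA : stepA (m, c, s) x
      = (max m (if s = some x then c + 1 else 1),
          (if s = some x then c + 1 else 1), some x) := by
    rcases hx with h | h <;> subst h <;>
      · simp only [stepA]
        split_ifs <;> simp_all <;> omega
  rw [hA]
  cases gs with
  | nil =>
    simp only at h2
    obtain ⟨hc, hs⟩ := h2
    subst hs
    have hm : m = 0 := by simpa using h1
    subst hm
    simp [stepB, RelAB]
  | cons g rest =>
    obtain ⟨p, n⟩ := g
    simp only at h2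
    obtain ⟨hc, hs⟩ := h2
    subst hc
    subst hs
    have hm : m = max c ((rest.map Prod.snd).foldl max 0) := by
      rw [h1]; simp only [List.map_cons]; rw [foldl_max_zero_cons]
    by_cases hpx : p = x
    · subst hpx
      have hif : (if some p = some p then c + 1 else 1) = c + 1 := if_pos rfl
      have hl : stepB ((p, c) :: rest) p = (p, c + 1) :: rest := by simp [stepB]
      rw [hl]
      simp only [RelAB, List.map_cons, if_true]
      refine ⟨?_, by simp⟩
      rw [foldl_max_zero_cons, hm, max_right_comm]
      have h2 : max c (c + 1) = c + 1 := by simp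
      rw [h2]
    · have hsx : some p ≠ some x := by simpa using hpx
      have hif : (if some p = some x then c + 1 else 1) = 1 := if_neg hsx
      have hl : stepB ((p, c) :: rest) x = (x, 1) :: (p, c) :: rest := by simp [stepB, hpx]
      rw [hl]
      simp only [RelAB, List.map_cons, hif]
      refine ⟨?_, by simp⟩
      rw [foldl_max_zero_cons, foldl_max_zero_cons, ← hm, max_comm]

lemma Rel_foldl (ys : List Char) : ∀ (st : Int × Int × Option Char) (gs : List (Char × Int)),
    (∀ y ∈ ys, y = '<' ∨ y = '>') → RelAB st gs →
    RelAB (ys.foldl stepA st) (ys.foldl stepB gs) := by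
  induction ys with
  | nil => intro st gs _ h; exact h
  | cons y ys ih =>
    intro st gs hall h
    simp only [List.foldl]
    exact ih _ _ (fun z hz => hall z (List.mem_cons_of_mem _ hz))
      (Rel_step y (hall y (List.mem_cons_self)) h)

-- ===== VERDICT (by name: the statement is the Claim_ definition above) =====
theorem check_signs_spec : Claim_equal_check_signs := by
  intro word _
  unfold Spec_check_signs check_signs check_signs_alt
  simp only []
  generalize PySem.List.slice word.toList (some 2) none = xs
  rw [foldl_stepA_filter xs ((0 : Int), (0 : Int), (none : Option Char)) (by simp)]
  have hall : ∀ y ∈ xs.filter (fun c => c = '<' || c = '>'), y = '<' ∨ y = '>' := by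
    intro y hy
    have := List.of_mem_filter hy
    simpa using this
  have h0 : RelAB ((0 : Int), (0 : Int), (none : Option Char)) ([] : List (Char × Int)) := by
    simp [RelAB]
  exact (Rel_foldl (xs.filter (fun c => c = '<' || c = '>')) _ _ hall h0).1
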